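-- pv_equiv track=rewrite | github.com/zhuny/Codejam | CodeEatSwitcher/__main__.py | construct_path
-- ===== SOURCE A (Python) =====
-- def construct_path(slots):
--     coding = 0
--     eating = sum(slot[1] for slot in slots)
--     path = [(coding, eating)]
--     for slot in slots:
--         coding += slot[0]
--         eating -= slot[1]
--         path.append((coding, eating))
--     return path
-- ===== SOURCE B (Python) =====
-- def construct_path(slots):
--     # Build the two prefix-sum tables separately, then zip them into pairs.
--     total = sum(e for _, e in slots)
--     cs = [0]
--     for c, _ in slots:
--         cs.append(cs[-1] + c)
--     es = [0]
--     for _, e in slots: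
--         es.append(es[-1] + e)
--     return [(c, total - e) for c, e in zip(cs, es)]
-- ===== Notes on version B (the rewrite author's own statement) =====
-- stated objective: alternative
-- what changed: Replaces the single interleaved loop maintaining two running totals by two separately built prefix-sum tables (coding and eating) that are zipped into the result in a final pass.
import Mathlib
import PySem

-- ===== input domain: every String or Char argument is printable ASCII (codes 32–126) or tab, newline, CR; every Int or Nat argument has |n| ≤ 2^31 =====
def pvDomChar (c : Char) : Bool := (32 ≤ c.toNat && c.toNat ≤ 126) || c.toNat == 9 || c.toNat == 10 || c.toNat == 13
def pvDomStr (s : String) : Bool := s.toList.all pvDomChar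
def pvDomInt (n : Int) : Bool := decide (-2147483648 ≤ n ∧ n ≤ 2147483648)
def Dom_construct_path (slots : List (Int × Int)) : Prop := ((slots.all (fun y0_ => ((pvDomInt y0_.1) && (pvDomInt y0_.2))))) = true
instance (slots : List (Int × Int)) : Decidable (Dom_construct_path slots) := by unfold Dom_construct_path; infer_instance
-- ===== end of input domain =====

-- ===== PORT A =====
-- B builds the coding/eating prefix tables separately and zips them; same O(n) cost, different decomposition.
def goI_construct_path : List (Int × Int) → Int → Int → List (Int × Int)
  | [], _, _ => []
  | s :: rest, coding, eating =>
      (coding + s.1, eating - s.2) :: goI_construct_path rest (coding + s.1) (eating - s.2)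

def construct_path (slots : List (Int × Int)) : List (Int × Int) :=
  let eating : Int := (slots.map (fun s => s.2)).sum
  (0, eating) :: goI_construct_path slots 0 eating

-- ===== PORT B =====
-- running prefix-sum table: appends last + f p at each step (mirrors cs.append(cs[-1] + c))
def pvScan_construct_path (f : Int × Int → Int) : List (Int × Int) → Int → List Int
  | [], _ => []
  | p :: rest, last => (last + f p) :: pvScan_construct_path f rest (last + f p)

def construct_path_alt (slots : List (Int × Int)) : List (Int × Int) :=
  let total : Int := (slots.map (fun s => s.2)).sum
  let cs := 0 :: pvScan_construct_path (fun p => p.1) slots 0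
  let es := 0 :: pvScan_construct_path (fun p => p.2) slots 0
  List.zipWith (fun c e => (c, total - e)) cs es

-- ===== PRECONDITION & SPEC =====
def Spec_construct_path (slots : List (Int × Int)) (out : List (Int × Int)) : Prop := out = construct_path_alt slots
instance (slots : List (Int × Int)) (out : List (Int × Int)) : Decidable (Spec_construct_path slots out) := by unfold Spec_construct_path; infer_instance

-- ===== CLAIM (what is proved, stated in full; the proofs are below) =====
def Claim_equal_construct_path : Prop := ∀ (slots : List (Int × Int)), Dom_construct_path slots → Spec_construct_path slots (construct_path slots)

-- ===== LEMMAS AND PROOFS =====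
theorem pvScan_shift (f : Int × Int → Int) (l : List (Int × Int)) (a : Int) :
    pvScan_construct_path f l a = (pvScan_construct_path f l 0).map (fun x => a + x) := by
  induction l generalizing a with
  | nil => simp [pvScan_construct_path]
  | cons p rest ih =>
      simp only [pvScan_construct_path, List.map_cons, zero_add]
      congr 1
      rw [ih (a + f p), ih (f p), List.map_map]
      apply List.map_congr_left
      intro x _
      simp [Function.comp]; ring

theorem goA_zip (l : List (Int × Int)) (c e : Int) :
    goI_construct_path l c e =
      List.zipWith (fun x y => (c + x, e - y))
        (pvScan_construct_path (fun p => p.1) l 0)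
        (pvScan_construct_path (fun p => p.2) l 0) := by
  induction l generalizing c e with
  | nil => simp [goI_construct_path, pvScan_construct_path]
  | cons p rest ih =>
      simp only [goI_construct_path, pvScan_construct_path, zero_add, List.zipWith_cons_cons]
      congr 1
      rw [ih, pvScan_shift _ rest p.1, pvScan_shift _ rest p.2, List.zipWith_map]
      congr 1
      funext x y
      simp only [Prod.mk.injEq]
      constructor <;> ring

-- ===== VERDICT (by name: the statement is the Claim_ definition above) =====
theorem construct_path_spec : Claim_equal_construct_path := by
  intro slots _
  unfold Spec_construct_path construct_path construct_path_alt
  simp only [List.zipWith_cons_cons, sub_zero]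
  congr 1
  rw [goA_zip]
  congr 1
  funext x y
  simp only [Prod.mk.injEq]
  exact ⟨by ring, trivial⟩
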